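-- pv_equiv track=rewrite | github.com/kwakjeeyoon/Algorithm | 구현/시각.py | solution
-- ===== SOURCE A (Python) =====
-- def solution(N):
--     answer = 0
--     h,m,s = 0,0,0
--
--     while h != N+1:
--         s += 1
--         if s == 60:
--             m += 1
--             s = 0
--         if m == 60:
--             h += 1
--             m = 0
--         total = str(h) + str(m) + str(s)
--         if '3' in total:
--             answer += 1
--
--     return answer
-- ===== SOURCE B (Python) =====
-- def solution(N):
--     # Closed-form per hour: an hour whose digits contain '3' contributes all
--     # 3600 seconds; otherwise only the 1575 (m, s) pairs containing a '3'.
--     # The final tick (N+1):00:00 that the loop in A also inspects contributes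
--     # one more second iff str(N+1) contains '3'.
--     answer = 0
--     for h in range(N + 1):
--         answer += 3600 if '3' in str(h) else 1575
--     if '3' in str(N + 1):
--         answer += 1
--     return answer
-- ===== Notes on version B (the rewrite author's own statement) =====
-- stated objective: faster
-- what changed: Replaces the second-by-second simulation (3600 string-building iterations per hour) by a per-hour closed form: 3600 seconds if the hour's digits contain '3', else 1575, plus the final (N+1):00:00 tick that A's loop also counts.
-- outside the precondition, e.g. on solution(-2): A does not finish within the time limit, B returns 0
import Mathlib
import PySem

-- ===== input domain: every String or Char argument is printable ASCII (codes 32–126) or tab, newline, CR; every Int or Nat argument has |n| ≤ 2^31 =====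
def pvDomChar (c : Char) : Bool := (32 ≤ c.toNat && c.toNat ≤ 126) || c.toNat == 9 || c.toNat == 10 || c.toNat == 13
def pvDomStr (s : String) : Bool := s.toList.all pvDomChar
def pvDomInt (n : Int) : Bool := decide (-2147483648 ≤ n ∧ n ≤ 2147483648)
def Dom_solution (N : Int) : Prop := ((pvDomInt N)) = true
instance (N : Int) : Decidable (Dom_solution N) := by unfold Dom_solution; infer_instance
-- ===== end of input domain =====

-- B replaces A's second-by-second simulation by a per-hour closed form (3600 if the
-- hour's digits contain '3', else 1575) plus the final (N+1):00:00 tick A also counts.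

-- ===== PORT A =====
-- A's while loop, transliterated; the Nat fuel only makes the recursion total
-- (for N ≥ -1 the loop runs exactly ((N+1)*3600).toNat iterations, so the
-- fuel-exhaustion branch is never reached on inputs satisfying Pre_).
def loopA (N : Int) (h m s answer : Int) : Nat → Int
  | 0 => answer
  | fuel + 1 =>
    if h = N + 1 then answer
    else
      let s1 := s + 1
      let m1 := if s1 = 60 then m + 1 else m
      let s2 := if s1 = 60 then 0 else s1
      let h1 := if m1 = 60 then h + 1 else h
      let m2 := if m1 = 60 then 0 else m1
      let total := PySem.Int.toStr h1 ++ PySem.Int.toStr m2 ++ PySem.Int.toStr s2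
      let answer1 := if '3' ∈ total.toList then answer + 1 else answer
      loopA N h1 m2 s2 answer1 fuel

def solution (N : Int) : Int :=
  if 0 = N + 1 then 0 else loopA N 0 0 0 0 (((N + 1) * 3600).toNat)

-- ===== PORT B =====
def solution_alt (N : Int) : Int :=
  let answer := (PySem.List.pyRange 0 (N + 1) 1).foldl
    (fun acc h => acc + (if '3' ∈ (PySem.Int.toStr h).toList then 3600 else 1575)) 0
  if '3' ∈ (PySem.Int.toStr (N + 1)).toList then answer + 1 else answer

-- ===== PRECONDITION & SPEC =====
-- For N ≤ -2 the Python A never returns (h starts at 0 and only increases, so the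
-- loop condition h != N+1 never fails); Pre_ admits exactly the terminating inputs.
def Pre_solution (N : Int) : Prop := -1 ≤ N
instance (N : Int) : Decidable (Pre_solution N) := by unfold Pre_solution; infer_instance
def pvWitness_solution : Int := 2

def Spec_solution (N : Int) (out : Int) : Prop := out = solution_alt N
instance (N : Int) (out : Int) : Decidable (Spec_solution N out) := by unfold Spec_solution; infer_instance

-- ===== CLAIM (what is proved, stated in full; the proofs are below) =====
def Claim_equal_solution : Prop := ∀ (N : Int), Dom_solution N → Pre_solution N → Spec_solution N (solution N)

-- ===== LEMMAS AND PROOFS =====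

-- '3' occurs in str(x)
def c3 (x : Int) : Bool := '3' ∈ (PySem.Int.toChars x)

-- count over seconds s+1 .. s+k of the flag (hourHas3 || minuteHas3 || c3 second)
def secCount (hb mb : Bool) (s : Int) : Nat → Int
  | 0 => 0
  | k + 1 => (if hb || mb || c3 (s + 1) then (1:Int) else 0) + secCount hb mb (s + 1) k

-- count over k full minutes starting at minute m (each: 59 in-minute seconds + rollover tick)
def minCount (hb : Bool) (m : Int) : Nat → Int
  | 0 => 0
  | k + 1 => secCount hb (c3 m) 0 59 + (if hb || c3 (m + 1) then (1:Int) else 0)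
             + minCount hb (m + 1) k

-- count over k full hours starting at hour h (3599 in-hour ticks + hour-rollover tick)
def hourCount (h : Int) : Nat → Int
  | 0 => 0
  | k + 1 => (if c3 h then (3599:Int) else 1575) + (if c3 (h + 1) then (1:Int) else 0)
             + hourCount (h + 1) k

-- B's per-hour sum, recursively
def sumC (h : Int) : Nat → Int
  | 0 => 0
  | k + 1 => (if c3 h then (3600:Int) else 1575) + sumC (h + 1) k

theorem mem_append_toStr (h m s : Int) :
    ('3' ∈ (PySem.Int.toStr h ++ PySem.Int.toStr m ++ PySem.Int.toStr s).toList)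
      = (c3 h || c3 m || c3 s) := by
  simp [c3, PySem.Int.toList_toStr, or_assoc]

-- one in-minute step
theorem loopA_sec_step (N h m s answer : Int) (f : Nat)
    (hne : h ≠ N + 1) (hs : s + 1 ≠ 60) (hm : m ≠ 60) :
    loopA N h m s answer (f + 1)
      = loopA N h m (s + 1) (answer + (if c3 h || c3 m || c3 (s + 1) then 1 else 0)) f := by
  rw [loopA]
  simp only [if_neg hne, if_neg hs, if_neg hm, mem_append_toStr]
  split_ifs <;> simp_all

-- k in-minute steps
theorem loopA_sec_run (N : Int) (k : Nat) : ∀ (h m s answer : Int) (f : Nat),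
    h ≠ N + 1 → m ≠ 60 → 0 ≤ s → s + k ≤ 59 →
    loopA N h m s answer (f + k)
      = loopA N h m (s + k) (answer + secCount (c3 h) (c3 m) s k) f := by
  induction k with
  | zero => intro h m s answer f _ _ _ _; simp [secCount]
  | succ k ih =>
    intro h m s answer f hne hm hs hk
    have : f + (k + 1) = (f + k) + 1 := by omega
    rw [this, loopA_sec_step N h m s answer (f + k) hne (by omega) hm,
        ih h m (s + 1) _ f hne hm (by omega) (by omega)]
    have hss : s + (k + 1 : Nat) = (s + 1) + (k : Nat) := by push_cast; ring
    rw [hss, secCount]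
    ring_nf

-- minute rollover step (m + 1 ≠ 60)
theorem loopA_min_step (N h m answer : Int) (f : Nat)
    (hne : h ≠ N + 1) (hm : m + 1 ≠ 60) :
    loopA N h m 59 answer (f + 1)
      = loopA N h (m + 1) 0 (answer + (if c3 h || c3 (m + 1) then 1 else 0)) f := by
  rw [loopA]
  simp only [if_neg hne, mem_append_toStr]
  norm_num [if_neg hm]
  have : c3 0 = false := by decide
  split_ifs <;> simp_all

-- hour rollover step: from (h, 59, 59)
theorem loopA_hour_step (N h answer : Int) (f : Nat) (hne : h ≠ N + 1) :
    loopA N h 59 59 answer (f + 1)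
      = loopA N (h + 1) 0 0 (answer + (if c3 (h + 1) then 1 else 0)) f := by
  rw [loopA]
  simp only [if_neg hne, mem_append_toStr]
  norm_num
  have : c3 0 = false := by decide
  split_ifs <;> simp_all

-- k full minutes (m + k ≤ 59, so no hour rollover inside)
theorem loopA_min_run (N : Int) (k : Nat) : ∀ (h m answer : Int) (f : Nat),
    h ≠ N + 1 → 0 ≤ m → m + k ≤ 59 →
    loopA N h m 0 answer (f + 60 * k)
      = loopA N h (m + k) 0 (answer + minCount (c3 h) m k) f := by
  induction k with
  | zero => intro h m answer f _ _ _; simp [minCount]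
  | succ k ih =>
    intro h m answer f hne hm hk
    have e1 : f + 60 * (k + 1) = ((f + 60 * k) + 1) + 59 := by omega
    rw [e1, loopA_sec_run N 59 h m 0 answer _ hne (by omega) (by omega) (by omega)]
    norm_num
    rw [loopA_min_step N h m _ (f + 60 * k) hne (by omega),
        ih h (m + 1) _ f hne (by omega) (by omega)]
    rw [show m + ((k : Int) + 1) = (m + 1) + (k : Int) from by ring]
    congr 1
    rw [minCount]
    ring

-- the concrete per-hour totals
set_option maxRecDepth 40000 in
theorem minCount_total (hb : Bool) :
    minCount hb 0 59 + secCount hb (c3 59) 0 59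
      = (if hb then (3599:Int) else 1575) := by
  cases hb <;> decide

-- one full hour: 3600 fuel, from (h,0,0) to (h+1,0,0)
theorem loopA_hour_block (N h answer : Int) (f : Nat) (hne : h ≠ N + 1) :
    loopA N h 0 0 answer (f + 3600)
      = loopA N (h + 1) 0 0
          (answer + (if c3 h then 3599 else 1575) + (if c3 (h + 1) then 1 else 0)) f := by
  have e1 : f + 3600 = (((f + 1) + 59) + 60 * 59) := by omega
  rw [e1, loopA_min_run N 59 h 0 answer _ hne (by omega) (by omega)]
  norm_num
  rw [loopA_sec_run N 59 h 59 0 _ _ hne (by omega) (by omega) (by omega)]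
  norm_num
  rw [loopA_hour_step N h _ f hne]
  congr 1
  have key := minCount_total (c3 h)
  cases hc : c3 h <;> cases hc1 : c3 (h + 1) <;> simp [hc] at key ⊢ <;> linarith

-- k full hours from (h,0,0), ending exactly when h + k = N + 1
theorem loopA_hour_run (N : Int) (k : Nat) : ∀ (h answer : Int),
    h + k = N + 1 →
    loopA N h 0 0 answer (3600 * k) = answer + hourCount h k := by
  induction k with
  | zero =>
    intro h answer hk
    norm_num [hourCount, loopA]
  | succ k ih =>
    intro h answer hk
    have hne : h ≠ N + 1 := by omega
    have e1 : 3600 * (k + 1) = 3600 * k + 3600 := by omega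
    rw [e1, loopA_hour_block N h answer _ hne, ih (h + 1) _ (by push_cast at hk ⊢; omega)]
    rw [hourCount]
    ring

-- telescoping: hourCount h k = sumC h k - [c3 h] + [c3 (h+k)]
theorem hourCount_eq_sumC (k : Nat) : ∀ (h : Int),
    hourCount h k = sumC h k - (if c3 h then 1 else 0) + (if c3 (h + k) then 1 else 0) := by
  induction k with
  | zero => intro h; simp [hourCount, sumC]
  | succ k ih =>
    intro h
    rw [hourCount, sumC, ih (h + 1)]
    have e : h + ((k:Int) + 1) = (h + 1) + (k:Int) := by ring
    push_cast
    rw [e]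
    cases hc : c3 h <;> simp <;> ring

-- B's fold equals sumC
theorem foldl_eq_sumC (k : Nat) : ∀ (a acc : Int),
    (PySem.List.pyRange a (a + k) 1).foldl
      (fun acc h => acc + (if '3' ∈ (PySem.Int.toStr h).toList then 3600 else 1575)) acc
      = acc + sumC a k := by
  induction k with
  | zero =>
    intro a acc
    rw [PySem.List.pyRange_one_eq_nil (by omega)]
    simp [sumC]
  | succ k ih =>
    intro a acc
    rw [PySem.List.pyRange_one_cons (by omega)]
    simp only [List.foldl_cons]
    have e : a + ((k:Int) + 1) = (a + 1) + (k:Int) := by ring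
    push_cast
    rw [e, ih (a + 1)]
    rw [sumC]
    simp only [c3, PySem.Int.toList_toStr]
    split_ifs <;> (try ring) <;> simp_all

-- ===== VERDICT (by name: the statement is the Claim_ definition above) =====
theorem solution_spec : Claim_equal_solution := by
  intro N _ hpre
  unfold Spec_solution solution solution_alt Pre_solution at *
  set k : Nat := (N + 1).toNat with hk
  have hfold := foldl_eq_sumC k 0 0
  rw [show (0:Int) + (k:Int) = N + 1 from by omega] at hfold
  by_cases h0 : (0:Int) = N + 1
  · have hk0 : k = 0 := by omega
    simp only [← h0]
    norm_num
    decide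
  · simp only [if_neg h0]
    have e : ((N + 1) * 3600).toNat = 3600 * k := by
      have : (N + 1) * 3600 = 3600 * (k : Int) := by omega
      omega
    rw [e, loopA_hour_run N k 0 0 (by omega), hourCount_eq_sumC k 0,
        show (0:Int) + (k:Int) = N + 1 from by omega, hfold]
    have hc0 : c3 0 = false := by decide
    have hcc : ('3' ∈ (PySem.Int.toStr (N + 1)).toList) = (c3 (N + 1) = true) := by
      simp [c3, PySem.Int.toList_toStr]
    simp only [hcc]
    cases hc : c3 (N + 1) <;> simp [hc0]
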